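-- pv_equiv track=rewrite | github.com/ZJHSteven/csv_importer | addon_importer.py | _apply_deck_prefix_to_tags
-- ===== SOURCE A (Python) =====
-- from typing import List, Tuple  # 说明：类型标注所需
--
-- def _is_type_tag(tag: str, prefix: str) -> bool:  # 说明：判断是否题型标签
--     return tag.startswith(prefix)  # 说明：题型标签以固定前缀开头
--
-- def _split_tag_parts(tag: str) -> List[str]:  # 说明：将树状标签拆为层级
--     if not tag:  # 说明：空字符串直接返回
--         return []  # 说明：无层级
--     return [item.strip() for item in tag.split("::") if item.strip()]  # 说明：去空并保留顺序
--
-- def _find_deck_overlap(deck_parts: List[str], tag_parts: List[str]) -> int:  # 说明：查找可重叠层级长度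
--     max_size = min(len(deck_parts), len(tag_parts))  # 说明：最大可能重叠长度
--     for size in range(max_size, 0, -1):  # 说明：从最大重叠开始尝试
--         if deck_parts[-size:] == tag_parts[:size]:  # 说明：尾部与头部匹配
--             return size  # 说明：返回匹配长度
--     return 0  # 说明：无重叠
--
-- def _prefix_tag_with_deck(tag: str, deck_parts: List[str]) -> str:  # 说明：为标签补齐牌堆前缀
--     tag_parts = _split_tag_parts(tag)  # 说明：拆分标签层级
--     if not tag_parts:  # 说明：空标签直接返回原值
--         return tag  # 说明：原样返回
--     if deck_parts[:len(tag_parts)] == tag_parts:  # 说明：标签已是牌堆前缀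
--         merged_parts = list(deck_parts)  # 说明：直接使用牌堆层级
--     else:  # 说明：需要根据重叠情况拼接
--         overlap = _find_deck_overlap(deck_parts, tag_parts)  # 说明：计算重叠层级长度
--         if overlap > 0:  # 说明：存在重叠层级
--             merged_parts = list(deck_parts[:-overlap]) + list(tag_parts)  # 说明：补齐缺失前缀
--         else:  # 说明：无重叠时直接拼接
--             merged_parts = list(deck_parts) + list(tag_parts)  # 说明：完整前缀 + 原标签
--     return "::".join(merged_parts)  # 说明：合并为树状标签字符串
--
-- def _apply_deck_prefix_to_tags(row_tags: List[str], deck_tag: str, type_prefix: str) -> List[str]:  # 说明：为普通标签补齐牌堆前缀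
--     normalized: List[str] = []  # 说明：准备返回的新标签列表
--     deck_parts = _split_tag_parts(deck_tag)  # 说明：拆分牌堆层级
--     for raw_tag in row_tags:  # 说明：逐个处理行内标签
--         cleaned = raw_tag.strip()  # 说明：清理空白
--         if not cleaned:  # 说明：空标签跳过
--             continue  # 说明：继续下一个标签
--         if _is_type_tag(cleaned, type_prefix):  # 说明：题型标签不套牌堆前缀
--             normalized.append(cleaned)  # 说明：保留原题型标签
--             continue  # 说明：进入下一个标签
--         if not deck_parts:  # 说明：没有牌堆前缀
--             normalized.append(cleaned)  # 说明：保留原标签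
--             continue  # 说明：进入下一个标签
--         if cleaned == deck_tag or cleaned.startswith(f"{deck_tag}::"):  # 说明：已带牌堆前缀
--             normalized.append(cleaned)  # 说明：直接保留
--             continue  # 说明：进入下一个标签
--         prefixed = _prefix_tag_with_deck(cleaned, deck_parts)  # 说明：补齐牌堆前缀
--         normalized.append(prefixed)  # 说明：保存补齐后的标签
--     return normalized  # 说明：返回处理后的标签列表
-- ===== SOURCE B (Python) =====
-- from typing import List  # same stdlib typing as A
--
--
-- def _split_parts(tag: str) -> List[str]:
--     if not tag:
--         return []
--     return [p.strip() for p in tag.split("::") if p.strip()]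
--
--
-- def _merge(deck_parts: List[str], tag_parts: List[str]) -> List[str]:
--     # Drop deck levels from the left until the remaining suffix is a prefix
--     # of the tag; what was dropped becomes the prefix of the merged tag.
--     if not deck_parts:
--         return tag_parts
--     if len(deck_parts) <= len(tag_parts) and tag_parts[: len(deck_parts)] == deck_parts:
--         return tag_parts
--     return [deck_parts[0]] + _merge(deck_parts[1:], tag_parts)
--
--
-- def _apply_deck_prefix_to_tags(row_tags: List[str], deck_tag: str, type_prefix: str) -> List[str]:
--     deck_parts = _split_parts(deck_tag)
--
--     def fix(tag: str) -> str:
--         if (tag.startswith(type_prefix) or not deck_parts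
--                 or tag == deck_tag or tag.startswith(deck_tag + "::")):
--             return tag
--         parts = _split_parts(tag)
--         if not parts:
--             return tag
--         if deck_parts[: len(parts)] == parts:
--             return "::".join(deck_parts)
--         return "::".join(_merge(deck_parts, parts))
--
--     return [fix(t) for t in (r.strip() for r in row_tags) if t]
-- ===== Notes on version B (the rewrite author's own statement) =====
-- stated objective: simpler
-- what changed: The descending-size slice-comparison loop plus slice reassembly for the deck/tag overlap is replaced by one structural recursion that drops deck levels from the left and emits the merged tag directly, and the outer append loop becomes a strip/filter/map pipeline.
import Mathlib
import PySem

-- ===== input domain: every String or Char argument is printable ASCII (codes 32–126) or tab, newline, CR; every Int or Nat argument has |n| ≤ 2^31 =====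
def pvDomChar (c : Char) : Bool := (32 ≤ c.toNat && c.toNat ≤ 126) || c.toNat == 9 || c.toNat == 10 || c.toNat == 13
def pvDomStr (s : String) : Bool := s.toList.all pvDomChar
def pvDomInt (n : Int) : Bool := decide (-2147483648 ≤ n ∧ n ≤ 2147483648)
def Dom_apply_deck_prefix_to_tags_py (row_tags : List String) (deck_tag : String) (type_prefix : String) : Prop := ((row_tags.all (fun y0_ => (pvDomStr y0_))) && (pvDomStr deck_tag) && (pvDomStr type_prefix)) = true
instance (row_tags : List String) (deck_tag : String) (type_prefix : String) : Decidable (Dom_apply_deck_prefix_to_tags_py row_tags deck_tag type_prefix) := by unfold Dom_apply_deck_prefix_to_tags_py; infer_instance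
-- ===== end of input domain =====

-- B replaces A's descending-size slice loop + slice reassembly with one structural
-- recursion that drops deck levels from the left, and turns the outer append loop
-- into a strip/filter/map pipeline; objective: simpler, same worst-case cost.


-- ===== PORT A =====

-- _split_tag_parts
def split_tag_parts_py (tag : String) : List String :=
  if tag = "" then []
  else
    match PySem.Str.split? tag "::" with
    | some items => (items.filter (fun item => PySem.Str.strip item ≠ "")).map PySem.Str.strip
    | none => []  -- unreachable: the separator is the literal "::" ≠ ""

-- _find_deck_overlap: for-loop with early return ported as find? over the range
def find_deck_overlap_py (deck_parts tag_parts : List String) : Int :=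
  let max_size : Int := min (deck_parts.length : Int) (tag_parts.length : Int)
  match (PySem.List.pyRange max_size 0 (-1)).find?
      (fun size => PySem.List.slice deck_parts (some (-size)) none
                 = PySem.List.slice tag_parts none (some size)) with
  | some size => size
  | none => 0

-- _prefix_tag_with_deck
def prefix_tag_with_deck_py (tag : String) (deck_parts : List String) : String :=
  let tag_parts := split_tag_parts_py tag
  if tag_parts = [] then tag
  else
    let merged_parts :=
      if PySem.List.slice deck_parts none (some (tag_parts.length : Int)) = tag_parts then
        deck_parts
      else
        let overlap := find_deck_overlap_py deck_parts tag_parts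
        if overlap > 0 then
          PySem.List.slice deck_parts none (some (-overlap)) ++ tag_parts
        else
          deck_parts ++ tag_parts
    PySem.Str.join "::" merged_parts

def apply_deck_prefix_to_tags_py (row_tags : List String) (deck_tag : String) (type_prefix : String) : List String :=
  let deck_parts := split_tag_parts_py deck_tag
  row_tags.foldl (fun normalized raw_tag =>
    let cleaned := PySem.Str.strip raw_tag
    if cleaned = "" then normalized
    else if PySem.Str.startswith cleaned type_prefix then normalized ++ [cleaned]
    else if deck_parts = [] then normalized ++ [cleaned]
    else if cleaned = deck_tag ∨ PySem.Str.startswith cleaned (deck_tag ++ "::") then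
      normalized ++ [cleaned]
    else normalized ++ [prefix_tag_with_deck_py cleaned deck_parts]) []

-- ===== PORT B =====

-- _split_parts (B's helper; same code as A's splitter, kept as its own def)
def split_parts_alt (tag : String) : List String :=
  if tag = "" then []
  else
    match PySem.Str.split? tag "::" with
    | some ps => (ps.filter (fun p => PySem.Str.strip p ≠ "")).map PySem.Str.strip
    | none => []  -- unreachable: the separator is the literal "::" ≠ ""

-- _merge: drop deck levels from the left until the suffix is a prefix of the tag
def merge_alt : List String → List String → List String
  | [], tag_parts => tag_parts
  | d :: ds, tag_parts =>
      if (d :: ds).length ≤ tag_parts.length ∧ tag_parts.take (d :: ds).length = d :: ds then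
        tag_parts
      else
        d :: merge_alt ds tag_parts

def apply_deck_prefix_to_tags_py_alt (row_tags : List String) (deck_tag : String) (type_prefix : String) : List String :=
  let deck_parts := split_parts_alt deck_tag
  let fix := fun (tag : String) =>
    if PySem.Str.startswith tag type_prefix || deck_parts.isEmpty || tag == deck_tag
        || PySem.Str.startswith tag (deck_tag ++ "::") then
      tag
    else
      let parts := split_parts_alt tag
      if parts.isEmpty then tag
      else if deck_parts.take parts.length == parts then PySem.Str.join "::" deck_parts
      else PySem.Str.join "::" (merge_alt deck_parts parts)
  ((row_tags.map PySem.Str.strip).filter (fun t => t ≠ "")).map fix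

-- ===== PRECONDITION & SPEC =====
def Spec_apply_deck_prefix_to_tags_py (row_tags : List String) (deck_tag : String) (type_prefix : String) (out : List String) : Prop := out = apply_deck_prefix_to_tags_py_alt row_tags deck_tag type_prefix
instance (row_tags : List String) (deck_tag : String) (type_prefix : String) (out : List String) : Decidable (Spec_apply_deck_prefix_to_tags_py row_tags deck_tag type_prefix out) := by unfold Spec_apply_deck_prefix_to_tags_py; infer_instance

-- ===== CLAIM (what is proved, stated in full; the proofs are below) =====
def Claim_equal_apply_deck_prefix_to_tags_py : Prop := ∀ (row_tags : List String) (deck_tag : String) (type_prefix : String), Dom_apply_deck_prefix_to_tags_py row_tags deck_tag type_prefix → Spec_apply_deck_prefix_to_tags_py row_tags deck_tag type_prefix (apply_deck_prefix_to_tags_py row_tags deck_tag type_prefix)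

-- ===== LEMMAS AND PROOFS =====

-- find? over a list only depends on the predicate's values on its members
theorem find?_congr_mem {α : Type} {p q : α → Bool} :
    ∀ (l : List α), (∀ x ∈ l, p x = q x) → l.find? p = l.find? q
  | [], _ => rfl
  | a :: l, h => by
    rw [List.find?_cons, List.find?_cons, h a (by simp)]
    cases hq : q a
    · exact find?_congr_mem l (fun x hx => h x (by simp [hx]))
    · rfl

theorem split_eq (t : String) : split_parts_alt t = split_tag_parts_py t := rfl

theorem fdo_bounds (dp tp : List String) :
    0 ≤ find_deck_overlap_py dp tp ∧ find_deck_overlap_py dp tp ≤ (dp.length : Int) := by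
  simp only [find_deck_overlap_py]
  cases hf : (PySem.List.pyRange (min (dp.length : Int) (tp.length : Int)) 0 (-1)).find?
      (fun size => decide (PySem.List.slice dp (some (-size)) none
                 = PySem.List.slice tp none (some size))) with
  | none => simp
  | some s =>
      have hm := PySem.List.mem_pyRange_neg_one.mp (List.mem_of_find?_eq_some hf)
      have hred : (match (some s : Option Int) with | some size => size | none => 0) = s := rfl
      rw [hred]
      constructor <;> omega

theorem fdo_nil (tp : List String) : find_deck_overlap_py [] tp = 0 := by
  simp only [find_deck_overlap_py, List.length_nil, Nat.cast_zero]
  rw [PySem.List.pyRange_neg_one_eq_nil (min_le_left 0 (tp.length : Int))]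
  rfl

theorem fdo_cons (d : String) (ds tp : List String) :
    find_deck_overlap_py (d :: ds) tp =
      if (d :: ds).length ≤ tp.length ∧ tp.take (d :: ds).length = d :: ds
      then ((d :: ds).length : Int) else find_deck_overlap_py ds tp := by
  have hcongr : ∀ s ∈ PySem.List.pyRange ((ds.length : Int)) 0 (-1),
      (decide (PySem.List.slice (d :: ds) (some (-s)) none = PySem.List.slice tp none (some s)))
      = (decide (PySem.List.slice ds (some (-s)) none = PySem.List.slice tp none (some s))) := by
    intro s hs
    have hb := PySem.List.mem_pyRange_neg_one.mp hs
    have h1 : s = ((s.toNat : Nat) : Int) := (Int.toNat_of_nonneg (by omega)).symm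
    rw [h1, PySem.List.slice_from_neg_natCast _ _ (by omega),
        PySem.List.slice_from_neg_natCast _ _ (by omega)]
    have h2 : (d :: ds).length - s.toNat = (ds.length - s.toNat) + 1 := by
      simp only [List.length_cons]; omega
    rw [h2, List.drop_succ_cons]
  simp only [find_deck_overlap_py]
  by_cases hnm : (d :: ds).length ≤ tp.length
  · have hmin : min ((d :: ds).length : Int) (tp.length : Int) = ((d :: ds).length : Int) := by
      rw [min_eq_left]; exact_mod_cast hnm
    have hmin' : min ((ds.length : Int)) (tp.length : Int) = (ds.length : Int) := by
      rw [min_eq_left]; simp at hnm ⊢; omega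
    rw [hmin, hmin', PySem.List.pyRange_neg_one_cons (by simp), List.find?_cons]
    rw [PySem.List.slice_from_neg_natCast (d :: ds) (d :: ds).length (by simp),
        PySem.List.slice_to_natCast]
    simp only [Nat.sub_self, List.drop_zero]
    by_cases hc : tp.take (d :: ds).length = d :: ds
    · have hc2 : (decide (d :: ds = List.take (d :: ds).length tp)) = true :=
        decide_eq_true hc.symm
      rw [if_pos ⟨hnm, hc⟩, hc2]
    · have hc2 : (decide (d :: ds = List.take (d :: ds).length tp)) = false :=
        decide_eq_false (fun hh => hc hh.symm)
      rw [hc2, if_neg (by tauto)]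
      have hstep : ((d :: ds).length : Int) - 1 = (ds.length : Int) := by simp
      rw [hstep, find?_congr_mem _ hcongr]
  · have hnmN : tp.length ≤ (d :: ds).length := by
      simp only [List.length_cons] at hnm ⊢; omega
    have hnmN' : tp.length ≤ ds.length := by
      simp only [List.length_cons] at hnm; omega
    have hmin : min ((d :: ds).length : Int) (tp.length : Int) = (tp.length : Int) :=
      min_eq_right (by exact_mod_cast hnmN)
    have hmin' : min ((ds.length : Int)) (tp.length : Int) = (tp.length : Int) :=
      min_eq_right (by exact_mod_cast hnmN')
    rw [hmin, hmin', if_neg (by tauto)]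
    rw [find?_congr_mem _ (fun s hs => hcongr s (by
      have h5 := PySem.List.mem_pyRange_neg_one.mp hs
      refine PySem.List.mem_pyRange_neg_one.mpr ?_
      simp only [List.length_cons] at hnm
      constructor
      · omega
      · have : ¬ ((ds.length : Nat) + 1 ≤ tp.length) := hnm
        omega))]

theorem merge_expand : ∀ (dp tp : List String),
    (if find_deck_overlap_py dp tp > 0
     then PySem.List.slice dp none (some (-(find_deck_overlap_py dp tp))) ++ tp
     else dp ++ tp) = merge_alt dp tp
  | [], tp => by
      rw [fdo_nil]
      simp [merge_alt]
  | d :: ds, tp => by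
      rw [fdo_cons]
      by_cases hc : (d :: ds).length ≤ tp.length ∧ tp.take (d :: ds).length = d :: ds
      · rw [if_pos hc, if_pos (by exact_mod_cast Nat.succ_pos ds.length),
            PySem.List.slice_to_neg_natCast _ _ (by simp)]
        simp only [Nat.sub_self, List.take_zero, List.nil_append, merge_alt]
        rw [if_pos hc]
      · rw [if_neg hc]
        have hb := fdo_bounds ds tp
        have IH := merge_expand ds tp
        by_cases hpos : find_deck_overlap_py ds tp > 0
        · rw [if_pos hpos] at IH ⊢
          have h1 : find_deck_overlap_py ds tp
              = (((find_deck_overlap_py ds tp).toNat : Nat) : Int) :=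
            (Int.toNat_of_nonneg (by omega)).symm
          rw [h1, PySem.List.slice_to_neg_natCast _ _ (by omega)] at IH ⊢
          have h2 : (d :: ds).length - (find_deck_overlap_py ds tp).toNat
              = (ds.length - (find_deck_overlap_py ds tp).toNat) + 1 := by
            simp only [List.length_cons]; omega
          rw [h2, List.take_succ_cons]
          simp only [merge_alt]
          rw [if_neg hc, List.cons_append, IH]
        · rw [if_neg hpos] at IH ⊢
          simp only [merge_alt]
          rw [if_neg hc, List.cons_append, IH]

theorem prefix_eq (c : String) (dp : List String) :
    prefix_tag_with_deck_py c dp =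
      (if (split_tag_parts_py c).isEmpty then c
       else if dp.take (split_tag_parts_py c).length == split_tag_parts_py c then
         PySem.Str.join "::" dp
       else PySem.Str.join "::" (merge_alt dp (split_tag_parts_py c))) := by
  simp only [prefix_tag_with_deck_py]
  by_cases h : split_tag_parts_py c = []
  · simp [h]
  · rw [if_neg h,
        if_neg (show ¬ ((split_tag_parts_py c).isEmpty = true) by simp [h]),
        PySem.List.slice_to_natCast]
    by_cases h2 : List.take (split_tag_parts_py c).length dp = split_tag_parts_py c
    · rw [if_pos h2,
          if_pos (show (List.take (split_tag_parts_py c).length dp == split_tag_parts_py c) = true by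
            simp [h2])]
    · rw [if_neg h2,
          if_neg (show ¬ ((List.take (split_tag_parts_py c).length dp == split_tag_parts_py c) = true) by
            simp [h2]),
          ← merge_expand dp (split_tag_parts_py c)]

theorem fix_eq (deck_tag type_prefix c : String) :
    (if PySem.Str.startswith c type_prefix then c
     else if split_tag_parts_py deck_tag = [] then c
     else if c = deck_tag ∨ PySem.Str.startswith c (deck_tag ++ "::") then c
     else prefix_tag_with_deck_py c (split_tag_parts_py deck_tag))
    = (if PySem.Str.startswith c type_prefix || (split_parts_alt deck_tag).isEmpty
          || c == deck_tag || PySem.Str.startswith c (deck_tag ++ "::") then c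
       else
         if (split_parts_alt c).isEmpty then c
         else if (split_parts_alt deck_tag).take (split_parts_alt c).length == split_parts_alt c
           then PySem.Str.join "::" (split_parts_alt deck_tag)
         else PySem.Str.join "::" (merge_alt (split_parts_alt deck_tag) (split_parts_alt c))) := by
  simp only [split_eq]
  rw [← prefix_eq c (split_tag_parts_py deck_tag)]
  simp only [Bool.or_eq_true, beq_iff_eq, List.isEmpty_iff]
  split_ifs <;> first | rfl | tauto

-- the outer loop: a foldl appending at most one element per item IS a strip/filter/map pipeline
theorem foldl_filtermap (f : List String → String → List String) (g : String → String)
    (hf : ∀ acc r, f acc r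
        = if PySem.Str.strip r = "" then acc else acc ++ [g (PySem.Str.strip r)]) :
    ∀ (l acc : List String),
      l.foldl f acc = acc ++ ((l.map PySem.Str.strip).filter (fun t => t ≠ "")).map g
  | [], acc => by simp
  | r :: l, acc => by
      rw [List.foldl_cons, hf, List.map_cons, List.filter_cons]
      by_cases h : PySem.Str.strip r = ""
      · rw [if_pos h, foldl_filtermap f g hf l acc]
        simp [h]
      · rw [if_neg h, foldl_filtermap f g hf l]
        simp [h, List.append_assoc]

-- ===== VERDICT (by name: the statement is the Claim_ definition above) =====
theorem apply_deck_prefix_to_tags_py_spec : Claim_equal_apply_deck_prefix_to_tags_py := by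
  intro row_tags deck_tag type_prefix _
  show apply_deck_prefix_to_tags_py row_tags deck_tag type_prefix
      = apply_deck_prefix_to_tags_py_alt row_tags deck_tag type_prefix
  simp only [apply_deck_prefix_to_tags_py, apply_deck_prefix_to_tags_py_alt]
  refine Eq.trans (foldl_filtermap _
    (fun tag =>
      if PySem.Str.startswith tag type_prefix || (split_parts_alt deck_tag).isEmpty
          || tag == deck_tag || PySem.Str.startswith tag (deck_tag ++ "::") then tag
      else
        if (split_parts_alt tag).isEmpty then tag
        else if (split_parts_alt deck_tag).take (split_parts_alt tag).length == split_parts_alt tag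
          then PySem.Str.join "::" (split_parts_alt deck_tag)
        else PySem.Str.join "::" (merge_alt (split_parts_alt deck_tag) (split_parts_alt tag)))
    ?_ row_tags []) (List.nil_append _)
  intro acc r
  dsimp only
  by_cases h : PySem.Str.strip r = ""
  · rw [if_pos h, if_pos h]
  · rw [if_neg h, if_neg h, ← fix_eq deck_tag type_prefix (PySem.Str.strip r)]
    split_ifs <;> rfl
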